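-- pv_equiv track=rewrite | github.com/davidvictor/mind | core/mind/services/content_policy.py | _normalize_policy_domains
-- ===== SOURCE A (Python) =====
-- from typing import Any, Iterable, Literal, Mapping, cast
--
-- PolicyDomain = Literal["business", "personal"]
--
-- _POLICY_DOMAIN_ORDER: tuple[PolicyDomain, ...] = ("business", "personal")
--
-- def _normalize_policy_domains(value: Iterable[object] | None) -> tuple[PolicyDomain, ...]:
--     seen: set[PolicyDomain] = set()
--     ordered: list[PolicyDomain] = []
--     for candidate in value or ():
--         text = str(candidate or "").strip().lower()
--         if text not in {"business", "personal"}: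
--             continue
--         domain = cast(PolicyDomain, text)
--         if domain in seen:
--             continue
--         seen.add(domain)
--         ordered.append(domain)
--     ordered.sort(key=_POLICY_DOMAIN_ORDER.index)
--     return tuple(ordered)
-- ===== SOURCE B (Python) =====
-- def _normalize_policy_domains(value):
--     normalized = [str(c or "").strip().lower() for c in (value or ())]
--     head = ("business",) if "business" in normalized else ()
--     tail = ("personal",) if "personal" in normalized else ()
--     return head + tail
-- ===== Notes on version B (the rewrite author's own statement) =====
-- stated objective: simpler
-- what changed: B keeps no set and no accumulator at all: it normalizes the input into a list, then builds the answer as the concatenation of two constant tuples, each included by a plain membership test for 'business' and 'personal'; A's dedup set, ordered list and sort-by-index all disappear.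
import Mathlib
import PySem

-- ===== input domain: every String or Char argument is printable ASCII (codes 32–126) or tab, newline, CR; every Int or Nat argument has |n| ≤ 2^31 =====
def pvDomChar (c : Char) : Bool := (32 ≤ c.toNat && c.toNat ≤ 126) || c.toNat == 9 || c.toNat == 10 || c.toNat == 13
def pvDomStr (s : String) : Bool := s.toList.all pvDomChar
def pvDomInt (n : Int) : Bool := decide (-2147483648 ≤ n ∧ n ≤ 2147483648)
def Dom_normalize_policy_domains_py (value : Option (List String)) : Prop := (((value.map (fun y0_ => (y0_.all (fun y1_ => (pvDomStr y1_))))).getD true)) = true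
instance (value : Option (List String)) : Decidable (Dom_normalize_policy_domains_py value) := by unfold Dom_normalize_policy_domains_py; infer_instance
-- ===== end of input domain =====

-- B replaces A's "dedup set + ordered accumulator + sort by tuple index" with a normalize pass
-- followed by the concatenation of two constant tuples gated by membership tests (objective: simpler).

-- str(candidate or "").strip().lower() on a string argument (candidate or "" is the identity on strings here)
def pyNorm (s : String) : String := PySem.Str.lower (PySem.Str.strip s)

def policyOrder : List String := ["business", "personal"]

-- ===== PORT A =====
-- A's sort key _POLICY_DOMAIN_ORDER.index raises only for elements not in the tuple, which
-- `ordered` never contains; the port totalises the key with .getD 0 (exact on every reachable list).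
def normalize_policy_domains_py (value : Option (List String)) : List String :=
  let st := (value.getD []).foldl
    (fun (st : PySem.Set String × List String) candidate =>
      let text := pyNorm candidate
      if text = "business" ∨ text = "personal" then
        if PySem.Set.contains st.1 text then st
        else (PySem.Set.add st.1 text, st.2 ++ [text])
      else st)
    (PySem.Set.empty, [])
  PySem.List.sorted st.2 (fun d => (PySem.List.index? policyOrder d).getD 0) false

-- ===== PORT B =====
def normalize_policy_domains_py_alt (value : Option (List String)) : List String :=
  let normalized := (value.getD []).map pyNorm
  let head := if "business" ∈ normalized then ["business"] else []
  let tail := if "personal" ∈ normalized then ["personal"] else []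
  head ++ tail

-- ===== PRECONDITION & SPEC =====
def Spec_normalize_policy_domains_py (value : Option (List String)) (out : List String) : Prop := out = normalize_policy_domains_py_alt value
instance (value : Option (List String)) (out : List String) : Decidable (Spec_normalize_policy_domains_py value out) := by unfold Spec_normalize_policy_domains_py; infer_instance

-- ===== CLAIM (what is proved, stated in full; the proofs are below) =====
def Claim_equal_normalize_policy_domains_py : Prop := ∀ (value : Option (List String)), Dom_normalize_policy_domains_py value → Spec_normalize_policy_domains_py value (normalize_policy_domains_py value)

-- ===== LEMMAS AND PROOFS =====

-- A's fold step acting on the set component alone, named for the lemmas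
def stepA (s : PySem.Set String) (candidate : String) : PySem.Set String :=
  let text := pyNorm candidate
  if text ∈ policyOrder then PySem.Set.add s text else s

-- A's paired state (seen, ordered) stays of the form (s, s).
lemma stepA_pair_eq (s : PySem.Set String) (c : String) :
    (if pyNorm c = "business" ∨ pyNorm c = "personal" then
        if PySem.Set.contains s (pyNorm c) then ((s, s) : PySem.Set String × List String)
        else (PySem.Set.add s (pyNorm c), s ++ [pyNorm c])
      else (s, s)) = (stepA s c, stepA s c) := by
  simp only [stepA, policyOrder, List.mem_cons, List.not_mem_nil, or_false]
  by_cases h : pyNorm c = "business" ∨ pyNorm c = "personal"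
  · simp only [if_pos h]
    by_cases hm : pyNorm c ∈ s
    · rw [if_pos ((PySem.Set.contains_iff _ _).mpr hm), PySem.Set.add_of_mem hm]
    · rw [if_neg (by simpa [PySem.Set.contains_iff] using hm), PySem.Set.add_of_not_mem hm]
  · simp only [if_neg h]

lemma foldA_eq (l : List String) (s : PySem.Set String) :
    l.foldl (fun (st : PySem.Set String × List String) candidate =>
      let text := pyNorm candidate
      if text = "business" ∨ text = "personal" then
        if PySem.Set.contains st.1 text then st
        else (PySem.Set.add st.1 text, st.2 ++ [text])
      else st) (s, s)
    = (l.foldl stepA s, l.foldl stepA s) := by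
  induction l generalizing s with
  | nil => rfl
  | cons c t ih =>
    simp only [List.foldl_cons]
    rw [stepA_pair_eq s c, ih]

lemma foldA_inv (l : List String) (s : PySem.Set String)
    (h : s.Nodup ∧ ∀ x ∈ s, x ∈ policyOrder) :
    (l.foldl stepA s).Nodup ∧ ∀ x ∈ l.foldl stepA s, x ∈ policyOrder := by
  induction l generalizing s with
  | nil => exact h
  | cons c t ih =>
    simp only [List.foldl_cons]
    refine ih _ ?_
    by_cases hc : pyNorm c ∈ policyOrder
    · rw [show stepA s c = PySem.Set.add s (pyNorm c) by simp only [stepA]; rw [if_pos hc]]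
      refine ⟨PySem.Set.nodup_add _ _ h.1, fun x hx => ?_⟩
      rcases (PySem.Set.mem_add _ _ _).mp hx with hs | he
      · exact h.2 x hs
      · subst he; exact hc
    · rw [show stepA s c = s by simp only [stepA]; rw [if_neg hc]]
      exact h

-- membership in A's fold set ↔ a normalized occurrence that is a policy domain
lemma mem_foldA (l : List String) (s : PySem.Set String) (x : String) :
    x ∈ l.foldl stepA s ↔ x ∈ s ∨ (x ∈ policyOrder ∧ x ∈ l.map pyNorm) := by
  induction l generalizing s with
  | nil => simp
  | cons c t ih =>
    simp only [List.foldl_cons, List.map_cons, List.mem_cons, ih]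
    by_cases hc : pyNorm c ∈ policyOrder
    · rw [show stepA s c = PySem.Set.add s (pyNorm c) by simp only [stepA]; rw [if_pos hc]]
      rw [PySem.Set.mem_add]
      constructor
      · rintro ((h | h) | ⟨hp, h⟩)
        · exact Or.inl h
        · exact Or.inr ⟨h ▸ hc, Or.inl h⟩
        · exact Or.inr ⟨hp, Or.inr h⟩
      · rintro (h | ⟨hp, h | h⟩)
        · exact Or.inl (Or.inl h)
        · exact Or.inl (Or.inr h)
        · exact Or.inr ⟨hp, h⟩
    · rw [show stepA s c = s by simp only [stepA]; rw [if_neg hc]]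
      constructor
      · rintro (h | ⟨hp, h⟩)
        · exact Or.inl h
        · exact Or.inr ⟨hp, Or.inr h⟩
      · rintro (h | ⟨hp, h | h⟩)
        · exact Or.inl h
        · exact absurd (h ▸ hp) hc
        · exact Or.inr ⟨hp, h⟩

-- On a Nodup list of policy-order elements, A's index-sort yields exactly B's concatenation.
lemma sorted_eq_concat (s : List String) (norm : List String)
    (hn : s.Nodup) (hs : ∀ x ∈ s, x ∈ policyOrder)
    (hmem : ∀ x, x ∈ s ↔ x ∈ policyOrder ∧ x ∈ norm) :
    PySem.List.sorted s (fun d => (PySem.List.index? policyOrder d).getD 0) false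
      = (if "business" ∈ norm then ["business"] else [])
        ++ (if "personal" ∈ norm then ["personal"] else []) := by
  have hb : ("business" ∈ norm) ↔ ("business" ∈ s) := by
    rw [hmem]; simp [policyOrder]
  have hp : ("personal" ∈ norm) ↔ ("personal" ∈ s) := by
    rw [hmem]; simp [policyOrder]
  match s with
  | [] =>
    rw [if_neg (by simp [hb]), if_neg (by simp [hp])]; decide
  | [a] =>
    rcases (by simpa [policyOrder] using hs a (by simp)) with h | h <;> subst h
    · rw [if_pos (hb.mpr (by simp)), if_neg (by simp [hp])]; decide
    · rw [if_neg (by simp [hb]), if_pos (hp.mpr (by simp))]; decide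
  | [a, b] =>
    rcases (by simpa [policyOrder] using hs a (by simp)) with ha | ha <;>
      rcases (by simpa [policyOrder] using hs b (by simp)) with hb' | hb' <;>
      subst ha <;> subst hb'
    · exact absurd hn (by decide)
    · rw [if_pos (hb.mpr (by simp)), if_pos (hp.mpr (by simp))]; decide
    · rw [if_pos (hb.mpr (by simp)), if_pos (hp.mpr (by simp))]; decide
    · exact absurd hn (by decide)
  | a :: b :: c :: t =>
    exfalso
    have ha := by simpa [policyOrder] using hs a (by simp)
    have hb' := by simpa [policyOrder] using hs b (by simp)
    have hc := by simpa [policyOrder] using hs c (by simp)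
    simp only [List.nodup_cons, List.mem_cons] at hn
    obtain ⟨hn1, hn2, -⟩ := hn
    rcases ha with h | h <;> rcases hb' with h' | h' <;> rcases hc with h'' | h'' <;>
      subst h <;> subst h' <;> simp_all

-- ===== VERDICT (by name: the statement is the Claim_ definition above) =====
theorem normalize_policy_domains_py_spec : Claim_equal_normalize_policy_domains_py := by
  intro value _
  unfold Spec_normalize_policy_domains_py normalize_policy_domains_py normalize_policy_domains_py_alt
  rw [show ((PySem.Set.empty : PySem.Set String), ([] : List String)) = (PySem.Set.empty, PySem.Set.empty) from rfl]
  rw [foldA_eq]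
  have hinv := foldA_inv (value.getD []) PySem.Set.empty ⟨List.nodup_nil, by simp [PySem.Set.empty]⟩
  refine sorted_eq_concat _ _ hinv.1 hinv.2 (fun x => ?_)
  rw [mem_foldA]
  simp [PySem.Set.empty]
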